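-- pv_equiv track=rewrite | github.com/AnMarga/HSE-Base-Python-2025 | Tasks/Homework_04/hw4_G.py | listing_game
-- ===== SOURCE A (Python) =====
-- def listing_game(n: int, start: int = 1, step: int = 1, direction: int = 1) -> int:
--     if n == 1:
--         return start
--     new_size = n // 2
--     if direction == 1:
--         new_start = start + step
--     else:
--         new_start = start if (n % 2 == 0) else (start + step)
--     return listing_game(new_size, new_start, step * 2, -direction)
-- ===== SOURCE B (Python) =====
-- def listing_game(n: int, start: int = 1, step: int = 1, direction: int = 1) -> int:
--     # Closed-sum formulation: at round i the surviving block is n >> i, the step is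
--     # step * 2**i and the direction is direction * (-1)**i; start advances by that
--     # step iff the direction is forward or the block size is odd.  Summing those
--     # contributions over all bit positions below the leading bit of n gives the result.
--     k = n.bit_length() - 1
--     total = 0
--     for i in range(k):
--         d = direction if i % 2 == 0 else -direction
--         if d == 1 or (n >> i) % 2 == 1:
--             total += step * 2 ** i
--     return start + total
-- ===== Notes on version B (the rewrite author's own statement) =====
-- stated objective: alternative
-- what changed: Replaced A's self-recursive state-threading descent by a direct summation over the bit positions of n: each round's contribution step*2**i is added iff the alternating direction is forward or (n >> i) is odd, so no recursion and no mutable n/start/step/direction state remains.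
import Mathlib
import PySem

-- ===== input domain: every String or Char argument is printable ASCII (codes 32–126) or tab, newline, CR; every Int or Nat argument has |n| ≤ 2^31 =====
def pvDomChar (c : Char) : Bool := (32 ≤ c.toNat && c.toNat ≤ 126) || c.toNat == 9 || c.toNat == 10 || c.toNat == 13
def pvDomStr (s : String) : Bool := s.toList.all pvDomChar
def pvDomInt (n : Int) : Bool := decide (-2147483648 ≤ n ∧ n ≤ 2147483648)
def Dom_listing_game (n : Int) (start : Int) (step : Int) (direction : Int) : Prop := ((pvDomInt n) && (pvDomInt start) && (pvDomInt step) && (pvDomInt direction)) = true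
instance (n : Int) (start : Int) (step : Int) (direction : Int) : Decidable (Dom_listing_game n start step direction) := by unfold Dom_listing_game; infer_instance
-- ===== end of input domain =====

-- B replaces A's self-recursive state-threading descent by a direct sum over the bit
-- positions of n (contribution step*2^i iff the alternating direction is forward or
-- n >> i is odd); same value, same O(log n) cost (objective: alternative).


-- ===== PORT A =====
-- Literal port of A's recursion, totalised with fuel n.toNat (ample: n strictly decreases
-- each call for n ≥ 1); fuel can run out only for n ≤ 0, where Python A recurses forever
-- (outside Pre_).
def listingGameGo (fuel : Nat) (n : Int) (start : Int) (step : Int) (direction : Int) : Int :=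
  match fuel with
  | 0 => 0  -- unreachable under Pre_
  | fuel + 1 =>
    if n = 1 then start
    else
      let new_size := PySem.Int.floordiv n 2
      let new_start :=
        if direction = 1 then start + step
        else if PySem.Int.mod n 2 = 0 then start else start + step
      listingGameGo fuel new_size new_start (step * 2) (-direction)

def listing_game (n : Int) (start : Int) (step : Int) (direction : Int) : Int :=
  listingGameGo n.toNat n start step direction

-- ===== PORT B =====
-- Port of B: k = n.bit_length() - 1 (PySem.Int.bitLength), then a fold over range(k)
-- summing the per-bit contributions; n >> i is Lean's '>>> i.toNat', 2**i is '2 ^ i.toNat'.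
def listing_game_alt (n : Int) (start : Int) (step : Int) (direction : Int) : Int :=
  let k : Int := (PySem.Int.bitLength n : Int) - 1
  let total : Int := (PySem.List.pyRange 0 k 1).foldl (fun total i =>
      let d := if PySem.Int.mod i 2 = 0 then direction else -direction
      if d = 1 ∨ PySem.Int.mod (n >>> i.toNat) 2 = 1 then total + step * 2 ^ i.toNat
      else total) 0
  start + total

-- ===== PRECONDITION & SPEC =====
-- Pre_: Python A recurses forever (RecursionError) whenever n ≤ 0, so only n ≥ 1 is admitted.
def Pre_listing_game (n : Int) (start : Int) (step : Int) (direction : Int) : Prop := 1 ≤ n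
instance (n : Int) (start : Int) (step : Int) (direction : Int) : Decidable (Pre_listing_game n start step direction) := by unfold Pre_listing_game; infer_instance
def pvWitness_listing_game : Int × Int × Int × Int := (10, 1, 1, 1)

def Spec_listing_game (n : Int) (start : Int) (step : Int) (direction : Int) (out : Int) : Prop := out = listing_game_alt n start step direction
instance (n : Int) (start : Int) (step : Int) (direction : Int) (out : Int) : Decidable (Spec_listing_game n start step direction out) := by unfold Spec_listing_game; infer_instance

-- ===== CLAIM (what is proved, stated in full; the proofs are below) =====
def Claim_equal_listing_game : Prop := ∀ (n : Int) (start : Int) (step : Int) (direction : Int), Dom_listing_game n start step direction → Pre_listing_game n start step direction → Spec_listing_game n start step direction (listing_game n start step direction)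

-- ===== LEMMAS AND PROOFS =====

-- The per-bit contribution of B, indexed by a natural bit position.
def lgTerm (n step direction : Int) (j : Nat) : Int :=
  if (if (j : Int) % 2 = 0 then direction else -direction) = 1 ∨ n >>> j % 2 = 1
  then step * 2 ^ j else 0

-- B's fold over range(k) is the initial value plus the sum of the per-bit terms.
theorem lg_fold_eq (n step direction : Int) : ∀ (l : List Nat) (a : Int),
    List.foldl (fun (total : Int) (j : Nat) =>
        if (if PySem.Int.mod (0 + (j : Int)) 2 = 0 then direction else -direction) = 1
           ∨ PySem.Int.mod (n >>> (0 + (j : Int)).toNat) 2 = 1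
        then total + step * 2 ^ (0 + (j : Int)).toNat else total) a l
      = a + (l.map (lgTerm n step direction)).sum := by
  intro l
  induction l with
  | nil => simp
  | cons j l ih =>
    intro a
    simp only [List.foldl_cons, List.map_cons, List.sum_cons]
    -- (foldl_cons may already be applied by rfl)
    rw [ih]
    unfold lgTerm
    simp only [zero_add, Int.toNat_natCast,
      PySem.Int.mod_eq_emod_of_pos (a := (j : Int)) (b := 2) (by norm_num),
      PySem.Int.mod_eq_emod_of_pos (a := n >>> j) (b := 2) (by norm_num)]
    split_ifs <;> ring

-- Shifting by j+1 is shifting the half by j.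
theorem lg_shift_succ (n : Int) (j : Nat) :
    n >>> (j + 1) = (PySem.Int.floordiv n 2) >>> j := by
  rw [PySem.Int.floordiv_eq_ediv_of_pos (by norm_num : (0:Int) < 2)]
  simp only [Int.shiftRight_eq_div_pow]
  push_cast
  rw [pow_succ, mul_comm ((2:Int)^j) 2, ← Int.ediv_ediv_of_nonneg (by norm_num : (0:Int) ≤ 2)]

-- One term of B's sum at position j+1 is the j-th term for the halved instance.
theorem lg_term_succ (n step direction : Int) (j : Nat) :
    lgTerm n step direction (j + 1)
      = lgTerm (PySem.Int.floordiv n 2) (step * 2) (-direction) j := by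
  unfold lgTerm
  rw [lg_shift_succ]
  simp only [Nat.cast_add, Nat.cast_one]
  by_cases hj : (j : Int) % 2 = 0
  · rw [if_neg (show ¬((j : Int) + 1) % 2 = 0 by omega), if_pos hj]
    by_cases hc : -direction = 1 ∨ (PySem.Int.floordiv n 2 >>> j) % 2 = 1
    · rw [if_pos hc, if_pos hc]; ring
    · rw [if_neg hc, if_neg hc]
  · rw [if_pos (show ((j : Int) + 1) % 2 = 0 by omega), if_neg hj, neg_neg]
    by_cases hc : direction = 1 ∨ (PySem.Int.floordiv n 2 >>> j) % 2 = 1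
    · rw [if_pos hc, if_pos hc]; ring
    · rw [if_neg hc, if_neg hc]

theorem lg_sum_succ (n step direction : Int) (m : Nat) :
    ((List.range (m + 1)).map (lgTerm n step direction)).sum
      = lgTerm n step direction 0
        + ((List.range m).map (lgTerm (PySem.Int.floordiv n 2) (step * 2) (-direction))).sum := by
  rw [List.range_succ_eq_map, List.map_cons, List.sum_cons, List.map_map]
  congr 1
  apply congrArg
  apply List.map_congr_left
  intro j _
  exact lg_term_succ n step direction j

-- B's value written with the Nat-indexed term function.
theorem alt_eq_sum (n start step direction : Int) (h : 1 ≤ n) :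
    listing_game_alt n start step direction
      = start + ((List.range (PySem.Int.bitLength n - 1)).map (lgTerm n step direction)).sum := by
  have hbl : 1 ≤ PySem.Int.bitLength n := by
    rw [PySem.Int.bitLength_of_pos (by omega)]; omega
  have hk : (((PySem.Int.bitLength n : Int)) - 1 - 0).toNat = PySem.Int.bitLength n - 1 := by
    omega
  simp only [listing_game_alt]
  rw [PySem.List.pyRange_one, hk]
  simp only [List.foldl_map]
  rw [lg_fold_eq]
  ring

theorem lg_agree (fuel : Nat) : ∀ (n : Int), 1 ≤ n → n.toNat ≤ fuel →
    ∀ (start step direction : Int),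
    listingGameGo fuel n start step direction = listing_game_alt n start step direction := by
  induction fuel with
  | zero => intro n hn hf _ _ _; omega
  | succ fuel ih =>
    intro n hn hf start step direction
    rw [listingGameGo]
    by_cases h1 : n = 1
    · subst h1
      rw [if_pos rfl, alt_eq_sum 1 start step direction (by omega)]
      have hb1 : PySem.Int.bitLength 1 = 1 := by decide
      simp [hb1]
    · have h2 : (2 : Int) ≤ n := by omega
      have hfd := PySem.Int.floordiv_eq_ediv_of_pos (a := n) (b := 2) (by norm_num)
      have hrec : (1 : Int) ≤ PySem.Int.floordiv n 2 := by rw [hfd]; omega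
      have hfuel : (PySem.Int.floordiv n 2).toNat ≤ fuel := by rw [hfd]; omega
      simp only [if_neg h1]
      rw [ih (PySem.Int.floordiv n 2) hrec hfuel]
      rw [alt_eq_sum n start step direction hn,
          alt_eq_sum (PySem.Int.floordiv n 2) _ (step * 2) (-direction) hrec]
      have hbl : PySem.Int.bitLength n = PySem.Int.bitLength (PySem.Int.floordiv n 2) + 1 :=
        PySem.Int.bitLength_of_pos (by omega)
      have hbl2 : 1 ≤ PySem.Int.bitLength (PySem.Int.floordiv n 2) := by
        rw [PySem.Int.bitLength_of_pos (show (0:Int) < PySem.Int.floordiv n 2 by omega)]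
        omega
      have hm : PySem.Int.bitLength n - 1
          = (PySem.Int.bitLength (PySem.Int.floordiv n 2) - 1) + 1 := by omega
      rw [hm, lg_sum_succ]
      have hmod := PySem.Int.mod_eq_emod_of_pos (a := n) (b := 2) (by norm_num : (0:Int) < 2)
      have ht0 : lgTerm n step direction 0
          = if direction = 1 ∨ PySem.Int.mod n 2 = 1 then step else 0 := by
        unfold lgTerm
        norm_num [hmod]
      have hmod01 : PySem.Int.mod n 2 = 0 ∨ PySem.Int.mod n 2 = 1 := by rw [hmod]; omega
      by_cases hd : direction = 1
      · rw [ht0, if_pos hd, if_pos (Or.inl hd)]; ring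
      · rw [ht0, if_neg hd]
        rcases hmod01 with hm0 | hm1
        · rw [if_pos hm0, if_neg (by omega)]; ring
        · rw [if_neg (by omega), if_pos (Or.inr hm1)]; ring

-- ===== VERDICT (by name: the statement is the Claim_ definition above) =====
theorem listing_game_spec : Claim_equal_listing_game := by
  intro n start step direction _ hpre
  exact lg_agree n.toNat n hpre (le_refl _) start step direction
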